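-- pv_equiv track=rewrite | github.com/ZDawang/leetcode | 386_Lexicographical_Numbers.py | lexicalOrder2
-- ===== SOURCE A (Python) =====
-- def lexicalOrder2(n):
--     def dfs(num, n):
--         if num > n: return
--         res.append(num)
--         for i in range(10):
--             dfs(num * 10 + i, n)
--     res = []
--     for i in range(1, 10):
--         dfs(i, n)
--     return res
-- ===== SOURCE B (Python) =====
-- def lexicalOrder2(n):
--     res = []
--     stack = [i for i in range(9, 0, -1)]
--     while stack:
--         num = stack.pop()
--         if num <= n:
--             res.append(num)
--             for i in range(9, -1, -1):
--                 stack.append(num * 10 + i)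
--     return res
-- ===== Notes on version B (the rewrite author's own statement) =====
-- stated objective: alternative
-- what changed: Replaces A's recursive nested-function DFS over digit prefixes with an iterative explicit-stack loop that pops the next number and pushes its ten children in reverse digit order, no recursion involved.
import Mathlib
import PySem

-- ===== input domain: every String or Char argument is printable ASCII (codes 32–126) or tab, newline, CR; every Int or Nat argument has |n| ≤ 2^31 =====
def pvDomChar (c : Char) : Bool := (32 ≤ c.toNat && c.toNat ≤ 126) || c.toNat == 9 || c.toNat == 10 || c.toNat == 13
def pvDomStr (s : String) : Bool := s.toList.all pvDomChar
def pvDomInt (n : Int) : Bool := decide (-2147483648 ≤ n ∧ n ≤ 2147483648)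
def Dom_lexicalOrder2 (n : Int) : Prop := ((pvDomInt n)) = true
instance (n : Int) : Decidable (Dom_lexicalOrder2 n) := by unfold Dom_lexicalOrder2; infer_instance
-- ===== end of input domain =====

-- B replaces A's recursive trie DFS by an iterative explicit-stack loop (children pushed in
-- reverse digit order); objective: alternative decomposition, same traversal cost.

-- ===== PORT A =====
-- def dfs(num, n): if num > n: return; res.append(num); for i in range(10): dfs(num*10+i, n)
-- The Nat fuel is only a totality guard; fuel 15 suffices for every |n| ≤ 2^31 since the
-- recursion dies as soon as num > n and num is multiplied by 10 at each level.
def dfsA (n : Int) : Nat → Int → List Int → List Int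
  | 0, _, acc => acc
  | f+1, num, acc =>
    if num > n then acc
    else (PySem.List.pyRange 0 10 1).foldl (fun a i => dfsA n f (num * 10 + i) a) (acc ++ [num])

def lexicalOrder2 (n : Int) : List Int :=
  (PySem.List.pyRange 1 10 1).foldl (fun a i => dfsA n 15 i a) []

-- ===== PORT B =====
-- while stack: num = stack.pop(); if num <= n: res.append(num); for i in range(9,-1,-1): stack.append(num*10+i)
-- Stack top = list head.  The Nat fuel bounds the number of loop iterations; the literal
-- 9999999999999999 = 9 * (1+10+…+10^15) iterations suffice for every |n| ≤ 2^31.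
def stackLoopB (n : Int) : Nat → List Int → List Int → List Int
  | 0, _, res => res
  | _+1, [], res => res
  | f+1, num :: rest, res =>
    if num ≤ n then
      stackLoopB n f ((PySem.List.pyRange 9 (-1) (-1)).foldl (fun st i => (num * 10 + i) :: st) rest)
        (res ++ [num])
    else stackLoopB n f rest res

def lexicalOrder2_alt (n : Int) : List Int :=
  stackLoopB n 9999999999999999 ((PySem.List.pyRange 9 0 (-1)).foldl (fun st i => i :: st) []) []

-- ===== PRECONDITION & SPEC =====
def Spec_lexicalOrder2 (n : Int) (out : List Int) : Prop := out = lexicalOrder2_alt n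
instance (n : Int) (out : List Int) : Decidable (Spec_lexicalOrder2 n out) := by unfold Spec_lexicalOrder2; infer_instance

-- ===== CLAIM (what is proved, stated in full; the proofs are below) =====
def Claim_equal_lexicalOrder2 : Prop := ∀ (n : Int), Dom_lexicalOrder2 n → Spec_lexicalOrder2 n (lexicalOrder2 n)

-- ===== LEMMAS AND PROOFS =====

-- the children of a trie node, in visiting order
def chlist (num : Int) : List Int := (PySem.List.pyRange 0 10 1).map (fun i => num * 10 + i)

-- number of loop iterations (stack pops) B spends on the subtree rooted at num, fuel-guarded
def cntB (n : Int) : Nat → Int → Nat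
  | 0, _ => 1
  | f+1, num => if num > n then 1 else 1 + ((chlist num).map (cntB n f)).sum

-- closed bound on cntB: Bnd f = 1 + 10 + … + 10^f
def Bnd : Nat → Nat
  | 0 => 1
  | f+1 => 1 + 10 * Bnd f

lemma dfsA_succ_eq (n : Int) (f : Nat) (num : Int) (acc : List Int) :
    dfsA n (f+1) num acc = if num > n then acc
      else (PySem.List.pyRange 0 10 1).foldl (fun a i => dfsA n f (num * 10 + i) a) (acc ++ [num]) := rfl

lemma cntB_succ_eq (n : Int) (f : Nat) (num : Int) :
    cntB n (f+1) num = if num > n then 1 else 1 + ((chlist num).map (cntB n f)).sum := rfl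

lemma mem_chlist {num x : Int} (hx : x ∈ chlist num) : ∃ i : Int, 0 ≤ i ∧ i < 10 ∧ x = num * 10 + i := by
  simp only [chlist, List.mem_map, PySem.List.mem_pyRange_one] at hx
  obtain ⟨i, ⟨h0, h1⟩, rfl⟩ := hx
  exact ⟨i, h0, h1, rfl⟩

lemma child_bound {n num x : Int} {f : Nat} (h1 : 1 ≤ num) (hf : n < num * 10 ^ (f+1))
    (hx : x ∈ chlist num) : 1 ≤ x ∧ n < x * 10 ^ f := by
  obtain ⟨i, h0, _, rfl⟩ := mem_chlist hx
  constructor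
  · nlinarith
  · have hp : (0:Int) < 10 ^ f := by positivity
    have : num * 10 ^ (f+1) = (num * 10) * 10 ^ f := by ring
    nlinarith

lemma one_le_cntB (n : Int) (f : Nat) (num : Int) : 1 ≤ cntB n f num := by
  cases f with
  | zero => simp [cntB]
  | succ f => simp only [cntB]; split <;> omega

lemma dfsA_congr (n : Int) : ∀ f g : Nat, ∀ num acc, 1 ≤ num → n < num * 10 ^ f → n < num * 10 ^ g →
    dfsA n f num acc = dfsA n g num acc := by
  intro f
  induction f with
  | zero =>
    intro g num acc h1 hf hg
    simp only [pow_zero, mul_one] at hf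
    cases g with
    | zero => rfl
    | succ g => simp [dfsA, hf]
  | succ f ih =>
    intro g num acc h1 hf hg
    cases g with
    | zero =>
      simp only [pow_zero, mul_one] at hg
      simp [dfsA, hg]
    | succ g =>
      simp only [dfsA]
      split
      · rfl
      · apply PySem.List.foldl_congr_mem
        intro a i hi
        have hx : (num * 10 + i) ∈ chlist num := by
          simp only [chlist, List.mem_map]; exact ⟨i, hi, rfl⟩
        obtain ⟨hc1, hcf⟩ := child_bound h1 hf hx
        obtain ⟨_, hcg⟩ := child_bound h1 hg hx
        exact ih g _ a hc1 hcf hcg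

lemma cntB_congr (n : Int) : ∀ f g : Nat, ∀ num, 1 ≤ num → n < num * 10 ^ f → n < num * 10 ^ g →
    cntB n f num = cntB n g num := by
  intro f
  induction f with
  | zero =>
    intro g num h1 hf hg
    simp only [pow_zero, mul_one] at hf
    cases g with
    | zero => rfl
    | succ g => simp [cntB, hf]
  | succ f ih =>
    intro g num h1 hf hg
    cases g with
    | zero =>
      simp only [pow_zero, mul_one] at hg
      simp [cntB, hg]
    | succ g =>
      simp only [cntB]
      split
      · rfl
      · congr 1
        congr 1
        apply List.map_congr_left
        intro x hx
        obtain ⟨hc1, hcf⟩ := child_bound h1 hf hx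
        obtain ⟨_, hcg⟩ := child_bound h1 hg hx
        exact ih g x hc1 hcf hcg

lemma length_chlist (num : Int) : (chlist num).length = 10 := by
  simp [chlist, PySem.List.length_pyRange_one]

lemma cntB_le_Bnd (n : Int) : ∀ f : Nat, ∀ num, cntB n f num ≤ Bnd f := by
  intro f
  induction f with
  | zero => intro num; simp [cntB, Bnd]
  | succ f ih =>
    intro num
    simp only [cntB, Bnd]
    split
    · omega
    · have hsum : ((chlist num).map (cntB n f)).sum ≤ ((chlist num).map (cntB n f)).length • Bnd f := by
        apply List.sum_le_card_nsmul
        intro x hx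
        simp only [List.mem_map] at hx
        obtain ⟨y, _, rfl⟩ := hx
        exact ih y
      simp only [List.length_map, length_chlist, smul_eq_mul] at hsum
      omega

lemma push_eq (num : Int) (rest : List Int) :
    (PySem.List.pyRange 9 (-1) (-1)).foldl (fun st i => (num * 10 + i) :: st) rest = chlist num ++ rest := by
  have h : PySem.List.pyRange 9 (-1) (-1) = [9,8,7,6,5,4,3,2,1,0] := by decide
  have h2 : PySem.List.pyRange 0 10 1 = [0,1,2,3,4,5,6,7,8,9] := by decide
  simp [h, h2, chlist, List.foldl]

-- child bounds used repeatedly at fuel 15/14 for |n| < 10^10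
lemma child15 {n num x : Int} (hn : n < 10 ^ 10) (hx : x ∈ chlist num) (h1 : 1 ≤ num) :
    1 ≤ x ∧ n < x * 10 ^ 14 ∧ n < x * 10 ^ 15 := by
  obtain ⟨i, h0, _, rfl⟩ := mem_chlist hx
  have hx1 : (10:Int) ≤ num * 10 + i := by nlinarith
  refine ⟨by omega, ?_, ?_⟩
  · have : (10:Int) * 10 ^ 14 ≤ (num * 10 + i) * 10 ^ 14 := by
      apply mul_le_mul_of_nonneg_right hx1 (by positivity)
    calc n < 10 ^ 10 := hn
    _ ≤ (10:Int) * 10 ^ 14 := by norm_num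
    _ ≤ _ := this
  · have : (10:Int) * 10 ^ 15 ≤ (num * 10 + i) * 10 ^ 15 := by
      apply mul_le_mul_of_nonneg_right hx1 (by positivity)
    calc n < 10 ^ 10 := hn
    _ ≤ (10:Int) * 10 ^ 15 := by norm_num
    _ ≤ _ := this

-- the main bridge: B's stack loop computes A's folded DFS over the stack
lemma bridge (n : Int) (hn : n < 10 ^ 10) : ∀ f : Nat, ∀ stack res,
    (∀ num ∈ stack, 1 ≤ num) → (stack.map (cntB n 15)).sum ≤ f →
    stackLoopB n f stack res = stack.foldl (fun r num => dfsA n 15 num r) res := by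
  intro f
  induction f with
  | zero =>
    intro stack res _ hsum
    cases stack with
    | nil => rfl
    | cons num rest =>
      exfalso
      have := one_le_cntB n 15 num
      simp only [List.map_cons, List.sum_cons] at hsum
      omega
  | succ f ih =>
    intro stack res hmem hsum
    cases stack with
    | nil => rfl
    | cons num rest =>
      have h1 : 1 ≤ num := hmem num (by simp)
      simp only [List.map_cons, List.sum_cons] at hsum
      by_cases hle : num ≤ n
      · have hngt : ¬ num > n := by omega
        simp only [stackLoopB, if_pos hle, push_eq, List.foldl_cons]
        -- unfold the head DFS step and lift children to fuel 15
        have hdfs : dfsA n 15 num res = (chlist num).foldl (fun a c => dfsA n 15 c a) (res ++ [num]) := by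
          conv_lhs => rw [show (15:Nat) = 14+1 from rfl, dfsA_succ_eq, if_neg hngt]
          simp only [chlist, List.foldl_map]
          apply PySem.List.foldl_congr_mem
          intro a i hi
          have hx : (num * 10 + i) ∈ chlist num := by
            simp only [chlist, List.mem_map]; exact ⟨i, hi, rfl⟩
          obtain ⟨hc1, hc14, hc15⟩ := child15 hn hx h1
          exact dfsA_congr n 14 15 _ a hc1 hc14 hc15
        have hcnt : cntB n 15 num = 1 + ((chlist num).map (cntB n 15)).sum := by
          conv_lhs => rw [show (15:Nat) = 14+1 from rfl, cntB_succ_eq, if_neg hngt]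
          have hmap : (chlist num).map (cntB n 14) = (chlist num).map (cntB n 15) := by
            apply List.map_congr_left
            intro x hx
            obtain ⟨hc1, hc14, hc15⟩ := child15 hn hx h1
            exact cntB_congr n 14 15 x hc1 hc14 hc15
          rw [hmap]
        rw [ih (chlist num ++ rest) (res ++ [num]) ?_ ?_]
        · rw [List.foldl_append, hdfs]
        · intro x hx
          rcases List.mem_append.1 hx with hx | hx
          · exact (child15 hn hx h1).1
          · exact hmem x (by simp [hx])
        · simp only [List.map_append, List.sum_append]
          omega
      · have hgt : num > n := by omega
        simp only [stackLoopB, if_neg hle, List.foldl_cons]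
        have hdfs : dfsA n 15 num res = res := by
          conv_lhs => rw [show (15:Nat) = 14+1 from rfl, dfsA_succ_eq, if_pos hgt]
        have hcnt : cntB n 15 num = 1 := by
          conv_lhs => rw [show (15:Nat) = 14+1 from rfl, cntB_succ_eq, if_pos hgt]
        rw [hdfs]
        exact ih rest res (fun x hx => hmem x (by simp [hx])) (by omega)

lemma init_stack : (PySem.List.pyRange 9 0 (-1)).foldl (fun st (i : Int) => i :: st) [] =
    ([1,2,3,4,5,6,7,8,9] : List Int) := by decide

lemma Bnd15 : Bnd 15 = 1111111111111111 := by decide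

-- ===== VERDICT (by name: the statement is the Claim_ definition above) =====
theorem lexicalOrder2_spec : Claim_equal_lexicalOrder2 := by
  unfold Claim_equal_lexicalOrder2
  intro n hdom
  unfold Spec_lexicalOrder2
  have hn : n < 10 ^ 10 := by
    have h2 : n ≤ 2147483648 := by
      unfold Dom_lexicalOrder2 pvDomInt at hdom
      simpa using (of_decide_eq_true hdom).2
    calc n ≤ 2147483648 := h2
    _ < 10 ^ 10 := by norm_num
  unfold lexicalOrder2 lexicalOrder2_alt
  rw [init_stack, bridge n hn]
  · have h19 : PySem.List.pyRange 1 10 1 = ([1,2,3,4,5,6,7,8,9] : List Int) := by decide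
    rw [h19]
  · intro num hnum
    fin_cases hnum <;> norm_num
  · have hb : ∀ num ∈ ([1,2,3,4,5,6,7,8,9] : List Int), cntB n 15 num ≤ Bnd 15 := by
      intro num _; exact cntB_le_Bnd n 15 num
    have := List.sum_le_card_nsmul (([1,2,3,4,5,6,7,8,9] : List Int).map (cntB n 15)) (Bnd 15) ?_
    · simp only [List.length_map, smul_eq_mul] at this
      rw [Bnd15] at this
      norm_num at this ⊢
      omega
    · intro x hx
      simp only [List.mem_map] at hx
      obtain ⟨y, hy, rfl⟩ := hx
      exact hb y hy
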